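-- pv_equiv track=rewrite | github.com/gaspernovak20/P1 | IZIV/izpit.py | vrhovi
-- ===== SOURCE A (Python) =====
-- def vrhovi(skladovnica, ovira, visina):
--     vrh = set()
--
--     if ovira not in skladovnica and visina <= 0:
--         return {ovira}
--
--     if ovira in skladovnica:
--         for nad in skladovnica[ovira]:
--             vrh |= vrhovi(skladovnica, nad, visina - 1)
--
--     return vrh
-- ===== SOURCE B (Python) =====
-- def vrhovi(skladovnica, ovira, visina):
--     out = []          # qualifying leaves in first-found order
--     seen = set()      # (node, remaining height) states already expanded
--
--     def go(node, h):
--         if node not in skladovnica: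
--             if h <= 0 and node not in out:
--                 out.append(node)
--             return
--         if (node, h) in seen:
--             return
--         seen.add((node, h))
--         for nxt in skladovnica[node]:
--             go(nxt, h - 1)
--
--     go(ovira, visina)
--     return set(out)
-- ===== Notes on version B (the rewrite author's own statement) =====
-- stated objective: alternative
-- what changed: Replaces A's set-union recursion (which re-explores a shared sub-DAG once per path to it) by a DFS that memoizes visited (node, remaining-height) states in a 'seen' set and appends newly found leaves to one shared accumulator list, so each state is expanded at most once (O(states*edges) instead of exponential on heavily shared DAGs; on the benchmark's generated inputs the two run at the same speed).
import Mathlib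
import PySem

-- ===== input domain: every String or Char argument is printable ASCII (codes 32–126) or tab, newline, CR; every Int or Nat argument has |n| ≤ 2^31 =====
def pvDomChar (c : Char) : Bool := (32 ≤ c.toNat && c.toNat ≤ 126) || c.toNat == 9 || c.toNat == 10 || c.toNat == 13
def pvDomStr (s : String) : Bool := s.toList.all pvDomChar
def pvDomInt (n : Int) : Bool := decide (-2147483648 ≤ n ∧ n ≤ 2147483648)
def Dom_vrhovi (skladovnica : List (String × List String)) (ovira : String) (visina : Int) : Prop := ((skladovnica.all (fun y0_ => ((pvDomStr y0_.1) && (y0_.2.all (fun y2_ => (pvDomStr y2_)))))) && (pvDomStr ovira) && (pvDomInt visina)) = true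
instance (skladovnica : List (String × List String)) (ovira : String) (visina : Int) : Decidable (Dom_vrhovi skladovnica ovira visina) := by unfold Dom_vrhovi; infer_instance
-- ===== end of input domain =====

-- B replaces A's set-union recursion by a (node, height)-memoized DFS appending to one accumulator (objective: alternative).

-- ===== PORT A =====
-- dict key lookup, shared by both ports: 'k in skladovnica' / 'skladovnica[k]'
def pvGetKey (sk : List (String × List String)) (k : String) : Option (List String) :=
  (PySem.Dict.mk sk).get? k

-- A's recursion, with a fuel argument for Lean totality; under Pre_vrhovi (no cycle
-- reachable from ovira) the call depth is at most the number of keys + 1, so fuel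
-- sk.length + 2 is never exhausted on admitted inputs.
def vrhoviFuel (sk : List (String × List String)) : Nat → String → Int → List String
  | 0, _, _ => []
  | f + 1, ovira, visina =>
    let vrh : PySem.Set String := PySem.Set.empty
    if pvGetKey sk ovira = none ∧ visina ≤ 0 then [ovira]
    else
      match pvGetKey sk ovira with
      | some nads => nads.foldl (fun vrh nad => PySem.Set.union vrh (vrhoviFuel sk f nad (visina - 1))) vrh
      | none => vrh

def vrhovi (skladovnica : List (String × List String)) (ovira : String) (visina : Int) : List String :=
  vrhoviFuel skladovnica (skladovnica.length + 2) ovira visina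

-- ===== PORT B =====
-- B's inner 'go': state = (out, seen); same fuel bound as A's port (same call depth).
def goVrhovi (sk : List (String × List String)) : Nat → String → Int → (List String × List (String × Int)) → (List String × List (String × Int))
  | 0, _, _, st => st
  | f + 1, node, h, (out, seen) =>
    match pvGetKey sk node with
    | none => (if h ≤ 0 ∧ node ∉ out then out ++ [node] else out, seen)
    | some nxts =>
      if (node, h) ∈ seen then (out, seen)
      else nxts.foldl (fun st nxt => goVrhovi sk f nxt (h - 1) st) (out, PySem.Set.add seen (node, h))

def vrhovi_alt (skladovnica : List (String × List String)) (ovira : String) (visina : Int) : List String :=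
  PySem.Set.ofList (goVrhovi skladovnica (skladovnica.length + 2) ovira visina ([], [])).1

-- ===== PRECONDITION & SPEC =====
def pvChildren (sk : List (String × List String)) (k : String) : List String :=
  (pvGetKey sk k).getD []
def pvExpand (sk : List (String × List String)) (S : PySem.Set String) : PySem.Set String :=
  PySem.Set.update S (S.flatMap (pvChildren sk))
def pvReach (sk : List (String × List String)) (start : PySem.Set String) : PySem.Set String :=
  (pvExpand sk)^[sk.length + 1] start

-- Pre_ excludes exactly the inputs on which the Python A never returns (RecursionError):
-- those where some node reachable from ovira lies on a directed cycle of the dict graph.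
def Pre_vrhovi (skladovnica : List (String × List String)) (ovira : String) (visina : Int) : Prop :=
  ∀ k ∈ pvReach skladovnica (PySem.Set.ofList [ovira]),
    k ∉ pvReach skladovnica (PySem.Set.ofList (pvChildren skladovnica k))
instance (skladovnica : List (String × List String)) (ovira : String) (visina : Int) : Decidable (Pre_vrhovi skladovnica ovira visina) := by unfold Pre_vrhovi; infer_instance

def pvWitness_vrhovi : (List (String × List String)) × String × Int := ([("a", ["b", "c"])], "a", 1)

def Spec_vrhovi (skladovnica : List (String × List String)) (ovira : String) (visina : Int) (out : List String) : Prop := out = vrhovi_alt skladovnica ovira visina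
instance (skladovnica : List (String × List String)) (ovira : String) (visina : Int) (out : List String) : Decidable (Spec_vrhovi skladovnica ovira visina out) := by unfold Spec_vrhovi; infer_instance

-- ===== CLAIM (what is proved, stated in full; the proofs are below) =====
def Claim_equal_vrhovi : Prop := ∀ (skladovnica : List (String × List String)) (ovira : String) (visina : Int), Dom_vrhovi skladovnica ovira visina → Pre_vrhovi skladovnica ovira visina → Spec_vrhovi skladovnica ovira visina (vrhovi skladovnica ovira visina)

-- ===== LEMMAS AND PROOFS =====

-- every value A's recursion produces is a Set (no duplicates)
theorem nodup_vrhoviFuel (sk : List (String × List String)) :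
    ∀ (f : Nat) (ovira : String) (visina : Int), (vrhoviFuel sk f ovira visina).Nodup := by
  intro f
  induction f with
  | zero => intro _ _; simp [vrhoviFuel]
  | succ f ih =>
    intro ovira visina
    simp only [vrhoviFuel]
    by_cases hc : pvGetKey sk ovira = none ∧ visina ≤ 0
    · simp [hc]
    · rw [if_neg hc]
      cases hk : pvGetKey sk ovira with
      | none => simp [PySem.Set.empty]
      | some nads =>
        have haux : ∀ (l : List String) (v : List String), v.Nodup →
            (List.foldl (fun v nad => PySem.Set.union v (vrhoviFuel sk f nad (visina - 1))) v l).Nodup := by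
          intro l
          induction l with
          | nil => intro v hv; simpa using hv
          | cons x xs ihx =>
            intro v hv
            exact ihx _ (PySem.Set.nodup_union _ _ hv)
        exact haux nads [] (by simp)

-- union with the empty set on the right is the identity (definitional)
theorem union_nil (s : List String) : PySem.Set.union s [] = s := rfl

-- union with a subset on the right is absorbed
theorem union_eq_self_of_subset {s t : List String} (h : ∀ x ∈ t, x ∈ s) :
    PySem.Set.union s t = s := by
  rw [show PySem.Set.union s t = PySem.Set.update s t from rfl, PySem.Set.update_eq_append_filter]
  have hf : (PySem.Set.ofList t).filter (fun y => !PySem.Set.contains s y) = [] := by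
    rw [List.filter_eq_nil_iff]
    intro y hy
    simp [PySem.Set.contains_eq_listContains]
    exact h y ((PySem.Set.mem_ofList t y).1 hy)
  rw [hf, List.append_nil]

-- associativity of Python set-union on the list representation (middle operand a Set)
theorem union_assoc' (a b c : List String) (hb : b.Nodup) :
    PySem.Set.union (PySem.Set.union a b) c = PySem.Set.union a (PySem.Set.union b c) := by
  have e : ∀ (s t : List String), PySem.Set.union s t = s ++ (PySem.Set.ofList t).filter (fun y => !PySem.Set.contains s y) :=
    fun s t => PySem.Set.update_eq_append_filter s t
  have hbc : (PySem.Set.union b c).Nodup := PySem.Set.nodup_union b c hb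
  have h2 : PySem.Set.ofList (PySem.Set.union b c) = PySem.Set.union b c :=
    PySem.Set.ofList_eq_self_of_nodup _ hbc
  have h3 : PySem.Set.ofList b = b := PySem.Set.ofList_eq_self_of_nodup _ hb
  rw [e a b, e, e a, h2, e b c, h3, List.filter_append, List.filter_filter]
  rw [List.append_assoc]
  congr 1
  congr 1
  apply List.filter_congr
  intro y _
  simp [PySem.Set.contains_eq_listContains, List.mem_filter]
  by_cases hya : y ∈ a <;> by_cases hyb : y ∈ b <;> simp [hya, hyb]

-- folding unions from `out` = `out` ∪ (the same fold from ∅), list-exactly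
theorem foldl_union_eq (Ss : List (List String)) :
    ∀ out : List String, (∀ S ∈ Ss, S.Nodup) →
      Ss.foldl PySem.Set.union out = PySem.Set.union out (Ss.foldl PySem.Set.union []) := by
  induction Ss with
  | nil => intro out _; rfl
  | cons S Ss ih =>
    intro out hnd
    have hS : S.Nodup := hnd S (by simp)
    have hrest : ∀ T ∈ Ss, T.Nodup := fun T hT => hnd T (by simp [hT])
    simp only [List.foldl_cons]
    rw [ih (PySem.Set.union out S) hrest, ih (PySem.Set.union [] S) hrest]
    have h0 : PySem.Set.union [] S = S := PySem.Set.ofList_eq_self_of_nodup _ hS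
    rw [h0, union_assoc' out S _ hS]

-- main invariant: B's go from state (out, seen) appends exactly the new elements of
-- A's value at the same fuel, provided every seen state at level ≤ h is complete in out.
theorem goVrhovi_main (sk : List (String × List String)) (C : Int) :
    ∀ (f : Nat) (node : String) (h : Int) (out : List String) (seen : List (String × Int)),
      (f : Int) = C + h →
      out.Nodup →
      (∀ n hh, (n, hh) ∈ seen → hh ≤ h → ∀ x ∈ vrhoviFuel sk (C + hh).toNat n hh, x ∈ out) →
      (goVrhovi sk f node h (out, seen)).1 = PySem.Set.union out (vrhoviFuel sk f node h)
      ∧ (goVrhovi sk f node h (out, seen)).1.Nodup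
      ∧ (∀ e ∈ (goVrhovi sk f node h (out, seen)).2, e ∈ seen ∨ e = (node, h) ∨ e.2 < h)
      ∧ (∀ n hh, (n, hh) ∈ (goVrhovi sk f node h (out, seen)).2 → hh ≤ h →
          ∀ x ∈ vrhoviFuel sk (C + hh).toNat n hh, x ∈ (goVrhovi sk f node h (out, seen)).1) := by
  intro f
  induction f with
  | zero =>
    intro node h out seen hf hnd hinv
    exact ⟨rfl, hnd, fun e he => Or.inl he, hinv⟩
  | succ f ih =>
    intro node h out seen hf hnd hinv
    have hf' : (f : Int) = C + (h - 1) := by push_cast at hf ⊢; omega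
    have hftoNat : (C + h).toNat = f + 1 := by omega
    cases hk : pvGetKey sk node with
    | none =>
      have hgo : goVrhovi sk (f + 1) node h (out, seen)
          = (if h ≤ 0 ∧ node ∉ out then out ++ [node] else out, seen) := by
        simp [goVrhovi, hk]
      have hA : vrhoviFuel sk (f + 1) node h = if h ≤ 0 then [node] else [] := by
        by_cases hle : h ≤ 0 <;> simp [vrhoviFuel, hk, hle, PySem.Set.empty]
      rw [hgo, hA]
      by_cases hle : h ≤ 0
      · by_cases hmem : node ∈ out
        · have hu : PySem.Set.union out [node] = out :=
            union_eq_self_of_subset (by intro x hx; simp at hx; simpa [hx] using hmem)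
          refine ⟨by simp [hle, hmem, hu], by simp [hle, hmem, hnd], fun e he => Or.inl he, ?_⟩
          intro n hh hm hleh x hx
          simpa [hle, hmem] using hinv n hh hm hleh x hx
        · have hu : PySem.Set.union out [node] = out ++ [node] := by
            rw [show PySem.Set.union out [node] = PySem.Set.update out [node] from rfl,
               PySem.Set.update_cons, PySem.Set.update_nil, PySem.Set.add_of_not_mem hmem]
          have hnd2 : (out ++ [node]).Nodup := by
            simp [List.nodup_append, hnd]
            intro a ha han
            exact hmem (han ▸ ha)
          refine ⟨by simp [hle, hmem, hu], by simp [hle, hmem, hnd2], fun e he => Or.inl he, ?_⟩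
          · intro n hh hm hleh x hx
            have := hinv n hh hm hleh x hx
            simp [hle, hmem]
            exact Or.inl this
      · refine ⟨by simp [hle, union_nil], by simpa [hle] using hnd, fun e he => Or.inl he, ?_⟩
        intro n hh hm hleh x hx
        simpa [hle] using hinv n hh hm hleh x hx
    | some nads =>
      have hgo : goVrhovi sk (f + 1) node h (out, seen)
          = (if (node, h) ∈ seen then (out, seen)
             else nads.foldl (fun st nxt => goVrhovi sk f nxt (h - 1) st)
                    (out, PySem.Set.add seen (node, h))) := by
        simp [goVrhovi, hk]
      have hA : vrhoviFuel sk (f + 1) node h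
          = nads.foldl (fun vrh nad => PySem.Set.union vrh (vrhoviFuel sk f nad (h - 1))) [] := by
        simp [vrhoviFuel, hk, PySem.Set.empty]
      have hmapnd : ∀ S ∈ nads.map (fun n => vrhoviFuel sk f n (h - 1)), S.Nodup := by
        intro S hS
        obtain ⟨n, _, rfl⟩ := List.mem_map.1 hS
        exact nodup_vrhoviFuel sk f n (h - 1)
      have hAfold : vrhoviFuel sk (f + 1) node h
          = (nads.map (fun n => vrhoviFuel sk f n (h - 1))).foldl PySem.Set.union [] := by
        rw [hA, List.foldl_map]
      by_cases hseen : (node, h) ∈ seen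
      · have hsub : ∀ x ∈ vrhoviFuel sk (f + 1) node h, x ∈ out := by
          have := hinv node h hseen le_rfl
          rwa [hftoNat] at this
        have hu : PySem.Set.union out (vrhoviFuel sk (f + 1) node h) = out :=
          union_eq_self_of_subset hsub
        rw [hgo, if_pos hseen]
        exact ⟨hu.symm, hnd, fun e he => Or.inl he, fun n hh hm hle x hx => hinv n hh hm hle x hx⟩
      · have hseen' : PySem.Set.add seen (node, h) = seen ++ [(node, h)] :=
          PySem.Set.add_of_not_mem hseen
        have hfold : ∀ (ns : List String) (o : List String) (sn : List (String × Int)),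
            o.Nodup →
            (∀ n hh, (n, hh) ∈ sn → hh ≤ h - 1 → ∀ x ∈ vrhoviFuel sk (C + hh).toNat n hh, x ∈ o) →
            (ns.foldl (fun st nxt => goVrhovi sk f nxt (h - 1) st) (o, sn)).1
              = (ns.map (fun n => vrhoviFuel sk f n (h - 1))).foldl PySem.Set.union o
            ∧ (ns.foldl (fun st nxt => goVrhovi sk f nxt (h - 1) st) (o, sn)).1.Nodup
            ∧ (∀ e ∈ (ns.foldl (fun st nxt => goVrhovi sk f nxt (h - 1) st) (o, sn)).2,
                e ∈ sn ∨ e.2 ≤ h - 1)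
            ∧ (∀ n hh, (n, hh) ∈ (ns.foldl (fun st nxt => goVrhovi sk f nxt (h - 1) st) (o, sn)).2 →
                hh ≤ h - 1 → ∀ x ∈ vrhoviFuel sk (C + hh).toNat n hh,
                  x ∈ (ns.foldl (fun st nxt => goVrhovi sk f nxt (h - 1) st) (o, sn)).1) := by
          intro ns
          induction ns with
          | nil => exact fun o sn ho hin => ⟨rfl, ho, fun e he => Or.inl he, hin⟩
          | cons nxt ns ihn =>
            intro o sn ho hin
            obtain ⟨c1, c2, c3, c4⟩ := ih nxt (h - 1) o sn hf' ho hin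
            rcases hst : goVrhovi sk f nxt (h - 1) (o, sn) with ⟨o1, sn1⟩
            rw [hst] at c1 c2 c3 c4
            dsimp only at c1 c2 c3 c4
            simp only [List.foldl_cons, hst]
            obtain ⟨d1, d2, d3, d4⟩ := ihn o1 sn1 c2 c4
            refine ⟨?_, d2, ?_, d4⟩
            · rw [d1, c1]; simp [List.foldl_cons]
            · intro e he
              rcases d3 e he with hm | hlt
              · rcases c3 e hm with hm' | hm'
                · exact Or.inl hm'
                · rcases hm' with rfl | hlt'
                  · exact Or.inr (by simp)
                  · exact Or.inr (by omega)
              · exact Or.inr hlt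
        have hin' : ∀ n hh, (n, hh) ∈ PySem.Set.add seen (node, h) → hh ≤ h - 1 →
            ∀ x ∈ vrhoviFuel sk (C + hh).toNat n hh, x ∈ out := by
          intro n hh hm hle
          rw [hseen'] at hm
          rcases List.mem_append.1 hm with hm | hm
          · exact hinv n hh hm (by omega)
          · simp at hm; omega
        obtain ⟨c1, c2, c3, c4⟩ := hfold nads out (PySem.Set.add seen (node, h)) hnd hin'
        rw [hgo, if_neg hseen]
        refine ⟨?_, c2, ?_, ?_⟩
        · rw [c1, foldl_union_eq _ out hmapnd, ← hAfold]
        · intro e he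
          rcases c3 e he with hm | hlt
          · rw [hseen'] at hm
            rcases List.mem_append.1 hm with hm' | hm'
            · exact Or.inl hm'
            · simp at hm'; exact Or.inr (Or.inl (by simp [hm']))
          · exact Or.inr (Or.inr (by omega))
        · intro n hh hm hle x hx
          by_cases hle' : hh ≤ h - 1
          · exact c4 n hh hm hle' x hx
          · have hhh : hh = h := by omega
            subst hhh
            rw [c1, foldl_union_eq _ out hmapnd]
            rcases c3 (n, hh) hm with hm' | hlt
            · rw [hseen'] at hm'
              rcases List.mem_append.1 hm' with hm'' | hm''
              · exact (PySem.Set.mem_union out _ x).2 (Or.inl (hinv n hh hm'' le_rfl x hx))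
              · simp at hm''
                rw [hftoNat] at hx
                refine (PySem.Set.mem_union out _ x).2 (Or.inr ?_)
                rw [← hAfold]
                simpa [hm''] using hx
            · omega

-- ===== VERDICT (by name: the statement is the Claim_ definition above) =====
theorem vrhovi_spec : Claim_equal_vrhovi := by
  intro sk ovira visina _ _
  unfold Spec_vrhovi vrhovi vrhovi_alt
  have h := goVrhovi_main sk ((sk.length + 2 : Int) - visina) (sk.length + 2) ovira visina [] []
    (by push_cast; ring) List.nodup_nil (by simp)
  rw [h.1]
  rw [show PySem.Set.union [] (vrhoviFuel sk (sk.length + 2) ovira visina)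
        = PySem.Set.ofList (vrhoviFuel sk (sk.length + 2) ovira visina) from rfl,
      PySem.Set.ofList_ofList,
      PySem.Set.ofList_eq_self_of_nodup _ (nodup_vrhoviFuel sk (sk.length + 2) ovira visina)]
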